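-- pv_equiv track=rewrite | github.com/Zheruel/advent-of-code-2026 | aoc/day06/parser.py | _extract_problem_part2
-- ===== SOURCE A (Python) =====
-- def _extract_problem_part2(
--     lines: list[str], start_col: int, end_col: int
-- ) -> tuple[list[int], str] | None:
--     """Extract a single problem from a column range (Part 2 column-based).
--
--     Each column within the problem region represents one number.
--     Digits are stacked vertically with most significant at top.
--
--     Args:
--         lines: All lines of the worksheet (padded to equal length)
--         start_col: Starting column (inclusive)
--         end_col: Ending column (exclusive)
--
--     Returns:
--         Tuple of (numbers, operator) or None if invalid
--     """
--     num_rows = len(lines)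
--
--     # Last row contains the operator
--     operator_row = lines[num_rows - 1][start_col:end_col].strip()
--     if '+' in operator_row:
--         operator = '+'
--     elif '*' in operator_row:
--         operator = '*'
--     else:
--         return None
--
--     # Each column is a separate number (digits stacked vertically)
--     numbers = []
--     for col in range(start_col, end_col):
--         digits = ''
--         for row in range(num_rows - 1):
--             char = lines[row][col]
--             if char.isdigit():
--                 digits += char
--         if digits:
--             numbers.append(int(digits))
--
--     if not numbers:
--         return None
--
--     return (numbers, operator)
-- ===== SOURCE B (Python) =====
-- def _extract_problem_part2(
--     lines: list[str], start_col: int, end_col: int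
-- ) -> tuple[list[int], str] | None:
--     """Row-major single pass: maintain one digit accumulator per column."""
--     ops = lines[len(lines) - 1][start_col:end_col].strip()
--     operator = '+' if '+' in ops else '*' if '*' in ops else None
--     if operator is None:
--         return None
--
--     cols = [''] * max(end_col - start_col, 0)
--     for row in lines[:-1]:
--         for i, col in enumerate(range(start_col, end_col)):
--             c = row[col]
--             if c.isdigit():
--                 cols[i] += c
--
--     numbers = [int(d) for d in cols if d]
--     return (numbers, operator) if numbers else None
-- ===== Notes on version B (the rewrite author's own statement) =====
-- stated objective: alternative
-- what changed: Replaces A's column-major nested scan (one digit string built per column, re-indexing every row per column) by a single row-major pass that maintains a list of per-column digit accumulators, then filters/converts them at the end.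
import Mathlib
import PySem

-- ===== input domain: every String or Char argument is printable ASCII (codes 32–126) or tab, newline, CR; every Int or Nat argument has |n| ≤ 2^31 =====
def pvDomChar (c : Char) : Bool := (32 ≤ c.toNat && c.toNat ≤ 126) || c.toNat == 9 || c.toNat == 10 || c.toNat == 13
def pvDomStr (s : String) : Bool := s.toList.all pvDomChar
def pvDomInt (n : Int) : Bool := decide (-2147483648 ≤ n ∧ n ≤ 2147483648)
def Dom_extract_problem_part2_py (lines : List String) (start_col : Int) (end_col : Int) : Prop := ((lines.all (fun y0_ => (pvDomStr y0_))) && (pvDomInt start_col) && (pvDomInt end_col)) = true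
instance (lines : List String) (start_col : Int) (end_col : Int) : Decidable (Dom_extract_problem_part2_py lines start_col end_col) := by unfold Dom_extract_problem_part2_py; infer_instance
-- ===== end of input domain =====

-- B re-implements A with a single row-major pass over per-column digit accumulators (same results; 'alternative', not faster).

-- ===== PORT A =====
-- column-major: for each column, an inner scan over all rows builds that column's digit string
def extract_problem_part2_py (lines : List String) (start_col : Int) (end_col : Int) :
    Option (List Int × String) :=
  let num_rows : Int := (lines.length : Int)
  match PySem.List.pyGet? lines (num_rows - 1) with
  | none => none  -- IndexError on empty `lines` (excluded by Pre_)
  | some lastLine =>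
    let operator_row : List Char :=
      PySem.Chars.strip (PySem.Chars.slice lastLine.toList (some start_col) (some end_col))
    let operator? : Option String :=
      if PySem.Chars.isIn ['+'] operator_row then some "+"
      else if PySem.Chars.isIn ['*'] operator_row then some "*"
      else none
    match operator? with
    | none => none
    | some operator =>
      let numbers? : Option (List Int) :=
        (PySem.List.pyRange start_col end_col 1).foldl
          (fun numbers? col =>
            match numbers? with
            | none => none
            | some numbers =>
              let digits? : Option (List Char) :=
                (PySem.List.pyRange 0 (num_rows - 1) 1).foldl
                  (fun digits? row =>
                    match digits? with
                    | none => none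
                    | some digits =>
                      match PySem.List.pyGet? lines row with
                      | none => none
                      | some line =>
                        match PySem.Chars.pyGet? line.toList col with
                        | none => none  -- IndexError (excluded by Pre_)
                        | some ch =>
                          some (if PySem.Chars.isdigit ch then digits ++ [ch] else digits))
                  (some [])
              match digits? with
              | none => none
              | some digits =>
                if digits.isEmpty then some numbers
                else some (numbers ++ [(PySem.Int.ofChars? digits).getD 0]))
                  -- int(digits): digits is a nonempty run of ASCII digits, so ofChars? is always `some`
          (some [])
      match numbers? with
      | none => none
      | some numbers => if numbers.isEmpty then none else some (numbers, operator)

-- ===== PORT B =====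
-- row-major: one pass over the rows, a list of per-column digit accumulators updated in place
def extract_problem_part2_py_alt (lines : List String) (start_col : Int) (end_col : Int) :
    Option (List Int × String) :=
  match PySem.List.pyGet? lines ((lines.length : Int) - 1) with
  | none => none  -- IndexError on empty `lines` (excluded by Pre_)
  | some lastLine =>
    let ops : List Char :=
      PySem.Chars.strip (PySem.Chars.slice lastLine.toList (some start_col) (some end_col))
    let operator? : Option String :=
      if PySem.Chars.isIn ['+'] ops then some "+"
      else if PySem.Chars.isIn ['*'] ops then some "*"
      else none
    match operator? with
    | none => none
    | some operator =>
      let cols0 : List (List Char) := List.replicate (end_col - start_col).toNat []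
      let cols? : Option (List (List Char)) :=
        lines.dropLast.foldl
          (fun cols? row =>
            (PySem.List.enumerate (PySem.List.pyRange start_col end_col 1) 0).foldl
              (fun cols? p =>
                match cols? with
                | none => none
                | some cols =>
                  match PySem.Chars.pyGet? row.toList p.2 with
                  | none => none  -- IndexError (excluded by Pre_)
                  | some ch =>
                    some (if PySem.Chars.isdigit ch then
                            cols.set p.1.toNat (cols.getD p.1.toNat [] ++ [ch])
                          else cols))
              cols?)
          (some cols0)
      match cols? with
      | none => none
      | some cols =>
        let numbers : List Int :=
          (cols.filter (fun d => !d.isEmpty)).map (fun d => (PySem.Int.ofChars? d).getD 0)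
        if numbers.isEmpty then none else some (numbers, operator)

-- ===== PRECONDITION & SPEC =====
-- Pre_ excludes exactly the inputs where the Python A raises IndexError: an empty `lines`,
-- or (when an operator is present so the digit loop runs) some accessed cell lines[row][col]
-- out of range for a non-last row.  A returns normally everywhere else.
def Pre_extract_problem_part2_py (lines : List String) (start_col : Int) (end_col : Int) : Prop :=
  lines ≠ [] ∧
    ((PySem.Chars.isIn ['+'] (PySem.Chars.strip (PySem.Chars.slice (lines.getLastD "").toList (some start_col) (some end_col))) = true ∨
      PySem.Chars.isIn ['*'] (PySem.Chars.strip (PySem.Chars.slice (lines.getLastD "").toList (some start_col) (some end_col))) = true) →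
      ∀ s ∈ lines.dropLast, ∀ col ∈ PySem.List.pyRange start_col end_col 1,
        (PySem.Chars.pyGet? s.toList col).isSome = true)
instance (lines : List String) (start_col : Int) (end_col : Int) : Decidable (Pre_extract_problem_part2_py lines start_col end_col) := by unfold Pre_extract_problem_part2_py; infer_instance

def pvWitness_extract_problem_part2_py : List String × Int × Int := (["12", "+ "], 0, 2)

def Spec_extract_problem_part2_py (lines : List String) (start_col : Int) (end_col : Int) (out : Option (List Int × String)) : Prop := out = extract_problem_part2_py_alt lines start_col end_col
instance (lines : List String) (start_col : Int) (end_col : Int) (out : Option (List Int × String)) : Decidable (Spec_extract_problem_part2_py lines start_col end_col out) := by unfold Spec_extract_problem_part2_py; infer_instance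

-- ===== CLAIM (what is proved, stated in full; the proofs are below) =====
def Claim_equal_extract_problem_part2_py : Prop := ∀ (lines : List String) (start_col : Int) (end_col : Int), Dom_extract_problem_part2_py lines start_col end_col → Pre_extract_problem_part2_py lines start_col end_col → Spec_extract_problem_part2_py lines start_col end_col (extract_problem_part2_py lines start_col end_col)

-- ===== LEMMAS AND PROOFS =====

-- the character A reads at lines[row][col] (defaulted; used only where the access is valid)
def pvChA (r : String) (c : Int) : Char := (PySem.Chars.pyGet? r.toList c).getD ' '
-- the contribution of one row to one column's digit string
def pvRowContrib (r : String) (c : Int) : List Char :=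
  if PySem.Chars.isdigit (pvChA r c) then [pvChA r c] else []
-- the digit string of a column over all non-last rows
def pvDigitsCol (rs : List String) (c : Int) : List Char := rs.flatMap (fun r => pvRowContrib r c)

-- a fold whose Option state stays `some` is a total fold
theorem pv_foldl_option {α β : Type} (l : List α) (F : Option β → α → Option β) (g : β → α → β)
    (h : ∀ x ∈ l, ∀ b, F (some b) x = some (g b x)) :
    ∀ b, l.foldl F (some b) = some (l.foldl g b) := by
  induction l with
  | nil => intro b; rfl
  | cons x t ih =>
    intro b
    simp only [List.foldl_cons, h x (by simp) b]
    exact ih (fun y hy b' => h y (by simp [hy]) b') (g b x)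

theorem pv_map_getD_range {α : Type} (rs : List α) (d : α) :
    (List.range rs.length).map (fun j => rs.getD j d) = rs := by
  induction rs with
  | nil => rfl
  | cons r t ih =>
    simp only [List.length_cons, List.range_succ_eq_map, List.map_cons, List.map_map]
    exact congrArg (r :: ·) (by simpa using ih)

theorem pv_A_digits (lines : List String) (c : Int) (hn : lines ≠ [])
    (hv : ∀ s ∈ lines.dropLast, (PySem.Chars.pyGet? s.toList c).isSome = true) :
    (PySem.List.pyRange 0 ((lines.length : Int) - 1) 1).foldl
      (fun digits? row =>
        match digits? with
        | none => none
        | some digits =>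
          match PySem.List.pyGet? lines row with
          | none => none
          | some line =>
            match PySem.Chars.pyGet? line.toList c with
            | none => none
            | some ch => some (if PySem.Chars.isdigit ch then digits ++ [ch] else digits))
      (some []) = some (pvDigitsCol lines.dropLast c) := by
  have hlen : 1 ≤ lines.length := List.length_pos_iff.mpr hn
  have h1 : ((lines.length : Int) - 1) = ((lines.length - 1 : Nat) : Int) := by omega
  rw [h1, PySem.List.pyRange_zero_natCast, List.foldl_map]
  have hmem : ∀ j ∈ List.range (lines.length - 1), ∀ b : List Char,
      (fun digits? (row : Int) =>
        match digits? with
        | none => none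
        | some digits =>
          match PySem.List.pyGet? lines row with
          | none => none
          | some line =>
            match PySem.Chars.pyGet? line.toList c with
            | none => none
            | some ch => some (if PySem.Chars.isdigit ch then digits ++ [ch] else digits))
        (some b) ((j : Nat) : Int)
      = some (b ++ pvRowContrib (lines.getD j "") c) := by
    intro j hj b
    have hjlt : j < lines.length - 1 := List.mem_range.mp hj
    have hjl : j < lines.length := by omega
    have hgd : lines.getD j "" = lines[j] := List.getD_eq_getElem lines "" hjl
    have hget : PySem.List.pyGet? lines ((j : Nat) : Int) = some lines[j] := by
      rw [PySem.List.pyGet?_natCast, List.getElem?_eq_getElem hjl]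
    have hjd : j < lines.dropLast.length := by simp [List.length_dropLast]; omega
    have hdl : lines.dropLast[j] = lines[j] := List.getElem_dropLast hjd
    have hmemd : lines[j] ∈ lines.dropLast := hdl ▸ List.getElem_mem hjd
    obtain ⟨ch, hch⟩ := Option.isSome_iff_exists.mp (hv _ hmemd)
    have hch' : PySem.List.pyGet? (lines[j]).toList c = some ch := by simpa using hch
    simp only [hget, hgd]
    have hrc : pvRowContrib lines[j] c = if PySem.Chars.isdigit ch then [ch] else [] := by
      simp [pvRowContrib, pvChA, hch']
    rw [hrc]
    by_cases hd : PySem.Chars.isdigit ch <;> simp [hd, hch']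
  rw [pv_foldl_option _ _ _ hmem []]
  congr 1
  rw [PySem.List.foldl_append_eq_flatMap (g := fun j => pvRowContrib (lines.getD j "") c)]
  simp only [List.nil_append]
  have hrange : lines.length - 1 = lines.dropLast.length := by simp [List.length_dropLast]
  rw [hrange, pvDigitsCol]
  conv_rhs => rw [← pv_map_getD_range lines.dropLast ""]
  rw [List.flatMap_map]
  simp only [List.flatMap_def]
  congr 1
  apply List.map_congr_left
  intro j hj
  have hjlt : j < lines.dropLast.length := List.mem_range.mp hj
  have hjl : j < lines.length := by simp [List.length_dropLast] at hjlt; omega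
  congr 1
  rw [List.getD_eq_getElem lines "" hjl, List.getD_eq_getElem lines.dropLast "" hjlt]
  exact (List.getElem_dropLast hjlt).symm

theorem pv_B_inner (r : String) (C : List Int)
    (hv : ∀ c ∈ C, (PySem.Chars.pyGet? r.toList c).isSome = true) :
    ∀ (pre : List (List Char)) (g : Int → List Char),
    (PySem.List.enumerate C (pre.length : Int)).foldl
      (fun cols? p =>
        match cols? with
        | none => none
        | some cols =>
          match PySem.Chars.pyGet? r.toList p.2 with
          | none => none
          | some ch =>
            some (if PySem.Chars.isdigit ch then
                    cols.set p.1.toNat (cols.getD p.1.toNat [] ++ [ch])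
                  else cols))
      (some (pre ++ C.map g))
    = some (pre ++ C.map (fun c => g c ++ pvRowContrib r c)) := by
  induction C with
  | nil => intro pre g; simp [PySem.List.enumerate]
  | cons c t ih =>
    intro pre g
    obtain ⟨ch, hch⟩ := Option.isSome_iff_exists.mp (hv c (by simp))
    rw [PySem.List.enumerate_cons, List.foldl_cons]
    have hset : (pre ++ g c :: t.map g).set pre.length (g c ++ [ch]) = (pre ++ [g c ++ [ch]]) ++ t.map g := by
      simp [List.set_append_right]
    have hch' : PySem.List.pyGet? r.toList c = some ch := by simpa using hch
    have hrc : pvRowContrib r c = if PySem.Chars.isdigit ch then [ch] else [] := by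
      simp [pvRowContrib, pvChA, hch']
    have hstep :
        (match (some (pre ++ (c :: t).map g) : Option (List (List Char))) with
          | none => none
          | some cols =>
            match PySem.Chars.pyGet? r.toList c with
            | none => none
            | some ch =>
              some (if PySem.Chars.isdigit ch then
                      cols.set ((pre.length : Int)).toNat (cols.getD ((pre.length : Int)).toNat [] ++ [ch])
                    else cols))
        = some ((pre ++ [g c ++ pvRowContrib r c]) ++ t.map g) := by
      simp only [List.map_cons, hch, Int.toNat_natCast, hrc]
      by_cases hd : PySem.Chars.isdigit ch
      · simp [hd, hset]
      · simp [hd]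
    rw [hstep]
    have hlen : (pre.length : Int) + 1 = ((pre ++ [g c ++ pvRowContrib r c]).length : Int) := by
      simp
    rw [hlen]
    rw [ih (fun c' hc' => hv c' (by simp [hc'])) (pre ++ [g c ++ pvRowContrib r c]) g]
    simp

theorem pv_B_outer (rs : List String) (C : List Int)
    (hv : ∀ s ∈ rs, ∀ c ∈ C, (PySem.Chars.pyGet? s.toList c).isSome = true) :
    ∀ (g : Int → List Char),
    rs.foldl
      (fun cols? row =>
        (PySem.List.enumerate C 0).foldl
          (fun cols? p =>
            match cols? with
            | none => none
            | some cols =>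
              match PySem.Chars.pyGet? row.toList p.2 with
              | none => none
              | some ch =>
                some (if PySem.Chars.isdigit ch then
                        cols.set p.1.toNat (cols.getD p.1.toNat [] ++ [ch])
                      else cols))
          cols?)
      (some (C.map g))
    = some (C.map (fun c => g c ++ pvDigitsCol rs c)) := by
  induction rs with
  | nil => intro g; simp [pvDigitsCol]
  | cons r t ih =>
    intro g
    rw [List.foldl_cons]
    have h0 : (0 : Int) = (([] : List (List Char)).length : Int) := by simp
    have hinner := pv_B_inner r C (fun c hc => hv r (by simp) c hc) [] g
    simp only [List.nil_append, List.length_nil, Nat.cast_zero] at hinner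
    rw [hinner]
    rw [ih (fun s hs c hc => hv s (by simp [hs]) c hc) (fun c => g c ++ pvRowContrib r c)]
    simp [pvDigitsCol, List.append_assoc]

-- once the operator is fixed and every accessed cell is in range, the two scans agree
theorem pv_core (lines : List String) (s e : Int) (hne : lines ≠ [])
    (hvv : ∀ r ∈ lines.dropLast, ∀ col ∈ PySem.List.pyRange s e 1,
      (PySem.Chars.pyGet? r.toList col).isSome = true) (op : String) :
    (match
      (PySem.List.pyRange s e 1).foldl
        (fun numbers? col =>
          match numbers? with
          | none => none
          | some numbers =>
            match
              (PySem.List.pyRange 0 ((lines.length : Int) - 1) 1).foldl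
                (fun digits? row =>
                  match digits? with
                  | none => none
                  | some digits =>
                    match PySem.List.pyGet? lines row with
                    | none => none
                    | some line =>
                      match PySem.Chars.pyGet? line.toList col with
                      | none => none
                      | some ch => some (if PySem.Chars.isdigit ch then digits ++ [ch] else digits))
                (some []) with
            | none => none
            | some digits =>
              if digits.isEmpty then some numbers
              else some (numbers ++ [(PySem.Int.ofChars? digits).getD 0]))
        (some []) with
    | none => none
    | some numbers => if numbers.isEmpty then none else some (numbers, op))
    =
    (match
      lines.dropLast.foldl
        (fun cols? row =>
          (PySem.List.enumerate (PySem.List.pyRange s e 1) 0).foldl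
            (fun cols? p =>
              match cols? with
              | none => none
              | some cols =>
                match PySem.Chars.pyGet? row.toList p.2 with
                | none => none
                | some ch =>
                  some (if PySem.Chars.isdigit ch then
                          cols.set p.1.toNat (cols.getD p.1.toNat [] ++ [ch])
                        else cols))
            cols?)
        (some (List.replicate (e - s).toNat [])) with
    | none => none
    | some cols =>
      if ((cols.filter (fun d => !d.isEmpty)).map (fun d => (PySem.Int.ofChars? d).getD 0)).isEmpty then none
      else some ((cols.filter (fun d => !d.isEmpty)).map (fun d => (PySem.Int.ofChars? d).getD 0), op)) := by
  have hA : ∀ col ∈ PySem.List.pyRange s e 1, ∀ ns : List Int,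
      (fun numbers? (col : Int) =>
        match numbers? with
        | none => none
        | some numbers =>
          match
            (PySem.List.pyRange 0 ((lines.length : Int) - 1) 1).foldl
              (fun digits? row =>
                match digits? with
                | none => none
                | some digits =>
                  match PySem.List.pyGet? lines row with
                  | none => none
                  | some line =>
                    match PySem.Chars.pyGet? line.toList col with
                    | none => none
                    | some ch => some (if PySem.Chars.isdigit ch then digits ++ [ch] else digits))
              (some []) with
          | none => none
          | some digits =>
            if digits.isEmpty then some numbers
            else some (numbers ++ [(PySem.Int.ofChars? digits).getD 0])) (some ns) col
      = some (if (pvDigitsCol lines.dropLast col).isEmpty then ns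
              else ns ++ [(PySem.Int.ofChars? (pvDigitsCol lines.dropLast col)).getD 0]) := by
    intro col hcol ns
    simp only
    rw [pv_A_digits lines col hne (fun r hr => hvv r hr col hcol)]
    by_cases hd : (pvDigitsCol lines.dropLast col).isEmpty <;> simp [hd]
  rw [pv_foldl_option _ _ _ hA []]
  have hc0 : (List.replicate (e - s).toNat ([] : List Char))
      = (PySem.List.pyRange s e 1).map (fun _ => []) := by
    rw [List.map_const', PySem.List.length_pyRange_one]
  rw [hc0, pv_B_outer lines.dropLast (PySem.List.pyRange s e 1)
        (fun r hr c hc => hvv r hr c hc) (fun _ => [])]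
  have hnum : (PySem.List.pyRange s e 1).foldl
      (fun ns col => if (pvDigitsCol lines.dropLast col).isEmpty then ns
        else ns ++ [(PySem.Int.ofChars? (pvDigitsCol lines.dropLast col)).getD 0]) []
      = (((PySem.List.pyRange s e 1).map (fun c => ([] : List Char) ++ pvDigitsCol lines.dropLast c)).filter
          (fun d => !d.isEmpty)).map (fun d => (PySem.Int.ofChars? d).getD 0) := by
    have hG : (fun (ns : List Int) col => if (pvDigitsCol lines.dropLast col).isEmpty then ns
        else ns ++ [(PySem.Int.ofChars? (pvDigitsCol lines.dropLast col)).getD 0])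
        = fun ns col => if !(pvDigitsCol lines.dropLast col).isEmpty then
            ns ++ [(PySem.Int.ofChars? (pvDigitsCol lines.dropLast col)).getD 0] else ns := by
      funext ns col
      by_cases h : (pvDigitsCol lines.dropLast col).isEmpty <;> simp [h]
    rw [hG, PySem.List.foldl_append_if]
    simp [List.filter_map, List.map_map, Function.comp_def]
  simp only [hnum]

-- ===== VERDICT (by name: the statement is the Claim_ definition above) =====
theorem extract_problem_part2_py_spec : Claim_equal_extract_problem_part2_py := by
  intro lines s e _hdom hpre
  obtain ⟨hne, hv⟩ := hpre
  unfold Spec_extract_problem_part2_py extract_problem_part2_py extract_problem_part2_py_alt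
  have hlen : 1 ≤ lines.length := List.length_pos_iff.mpr hne
  have hlast : PySem.List.pyGet? lines ((lines.length : Int) - 1) = some (lines.getLastD "") := by
    have h1 : ((lines.length : Int) - 1) = ((lines.length - 1 : Nat) : Int) := by omega
    rw [h1, PySem.List.pyGet?_natCast, List.getElem?_eq_getElem (by omega : lines.length - 1 < lines.length)]
    have h2 : lines.getLastD "" = lines[lines.length - 1] := by
      rw [List.getLastD_eq_getLast?, List.getLast?_eq_getElem?,
        List.getElem?_eq_getElem (by omega : lines.length - 1 < lines.length)]
      rfl
    rw [h2]
  simp only [hlast]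
  simp only [PySem.Chars.slice_eq_listSlice, List.getLastD_eq_getLast?] at hv ⊢
  by_cases hplus : PySem.Chars.isIn ['+'] (PySem.Chars.strip (PySem.List.slice (lines.getLast?.getD "").toList (some s) (some e))) = true
  case neg =>
    by_cases hstar : PySem.Chars.isIn ['*'] (PySem.Chars.strip (PySem.List.slice (lines.getLast?.getD "").toList (some s) (some e))) = true
    case neg => simp [hplus, hstar]
    case pos =>
      simp only [if_neg hplus, if_pos hstar]
      exact pv_core lines s e hne (hv (Or.inr hstar)) "*"
  case pos =>
    simp only [if_pos hplus]
    exact pv_core lines s e hne (hv (Or.inl hplus)) "+"
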